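-- pv_equiv track=rewrite | github.com/beura-chirantan/sakkhi-bot | 1.py | max_sculptures
-- ===== SOURCE A (Python) =====
-- def max_sculptures(N, M, C, weights):
--     def can_pack(k):
--         # Try to pack k sculptures (from the rightmost k)
--         cnt = 1
--         curr = 0
--         for w in weights[N - k:]:
--             if w > C:
--                 return False
--             if curr + w > C:
--                 cnt += 1
--                 curr = 0
--             curr += w
--         return cnt <= M
--
--     left, right = 0, N
--     ans = 0
--     while left <= right:
--         mid = (left + right) // 2
--         if can_pack(mid):
--             ans = mid
--             left = mid + 1
--         else:
--             right = mid - 1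
--     return ans
-- ===== SOURCE B (Python) =====
-- def max_sculptures(N, M, C, weights):
--     # One right-to-left pass. bins[s] is the greedy bin count for the suffix
--     # starting at s, computed with a two-pointer (e, run) tracking the first
--     # bin of that suffix; a suffix of a packable suffix is packable, so scan
--     # from the right, stop at the first start that does not fit, and count
--     # how many of the rightmost N sculptures that start covers.
--     L = len(weights)
--     bins = [0] * (L + 1)
--     best = L
--     e = L
--     run = 0
--     for s in range(L - 1, -1, -1):
--         w = weights[s]
--         if w > C:
--             break
--         run += w
--         while run > C:
--             e -= 1
--             run -= weights[e]
--         bins[s] = bins[e] + 1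
--         if bins[s] > M:
--             break
--         best = s
--     return max(N - best, 0)
-- ===== Notes on version B (the rewrite author's own statement) =====
-- stated objective: faster
-- what changed: A re-runs the greedy next-fit packing inside a binary search over k; B makes one right-to-left pass with a two-pointer first-bin end and a DP array of bin counts per suffix start, stopping at the first suffix start that does not fit. Pre_ admits N <= 0, nonnegative weights, and lists whose last weight exceeds C (no nonempty suffix packs), with M >= 1 or N <= len(weights); …
-- outside the precondition, e.g. on max_sculptures(3, 1, 1, [1, 1, -4]): A returns 2, B returns 3; on max_sculptures(5, 0, 1, [1]): A returns 0, B returns 4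
import Mathlib
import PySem

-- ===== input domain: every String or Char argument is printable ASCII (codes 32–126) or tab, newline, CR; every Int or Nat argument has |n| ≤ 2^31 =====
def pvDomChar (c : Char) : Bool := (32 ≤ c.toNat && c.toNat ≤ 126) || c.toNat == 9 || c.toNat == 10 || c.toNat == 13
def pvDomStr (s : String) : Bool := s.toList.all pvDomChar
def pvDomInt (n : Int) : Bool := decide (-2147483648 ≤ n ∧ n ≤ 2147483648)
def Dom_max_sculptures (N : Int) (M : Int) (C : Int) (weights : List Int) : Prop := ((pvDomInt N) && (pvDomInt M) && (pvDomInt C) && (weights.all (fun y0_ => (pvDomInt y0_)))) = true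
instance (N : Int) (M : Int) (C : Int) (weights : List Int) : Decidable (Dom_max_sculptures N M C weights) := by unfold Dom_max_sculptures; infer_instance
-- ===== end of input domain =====

-- B replaces A's binary search (which re-runs the greedy packing per probe) by a single
-- right-to-left pass: a two-pointer first-bin end and a DP array of bin counts per suffix start.

-- ===== PORT A =====

-- inner loop of can_pack: early `return False` on w > C, else greedy next-fit count
def pvCanPackGo (C M : Int) : List Int → Int → Int → Bool
  | [], cnt, _curr => decide (cnt ≤ M)
  | w :: ws, cnt, curr =>
    if w > C then false
    else if curr + w > C then pvCanPackGo C M ws (cnt + 1) (0 + w)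
    else pvCanPackGo C M ws cnt (curr + w)

def pvCanPack (N M C : Int) (weights : List Int) (k : Int) : Bool :=
  pvCanPackGo C M (PySem.List.slice weights (some (N - k)) none) 1 0

-- the `while left <= right` loop; the interval [left, right] shrinks every iteration,
-- so (N + 2).toNat steps always suffice and the fuel-0 arm is never reached
def pvBSearch (N M C : Int) (weights : List Int) : Nat → Int → Int → Int → Int
  | 0, _left, _right, ans => ans
  | fuel + 1, left, right, ans =>
    if left ≤ right then
      let mid := PySem.Int.floordiv (left + right) 2
      if pvCanPack N M C weights mid then pvBSearch N M C weights fuel (mid + 1) right mid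
      else pvBSearch N M C weights fuel left (mid - 1) ans
    else ans

def max_sculptures (N : Int) (M : Int) (C : Int) (weights : List Int) : Int :=
  pvBSearch N M C weights (N + 2).toNat 0 N 0

-- ===== PORT B =====

-- the inner `while run > C: e -= 1; run -= weights[e]` (the e = 0 arm is a totality
-- guard the Python loop never reaches on inputs satisfying Pre_)
def pvShrink (C : Int) (ws : List Int) : Nat → Int → Nat × Int
  | 0, run => (0, run)
  | e' + 1, run =>
    if run ≤ C then (e' + 1, run)
    else pvShrink C ws e' (run - ws.getD e' 0)

-- the `for s in range(N - 1, -1, -1)` loop; the first argument counts the indices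
-- still to process (s = counter - 1), `break` returns best immediately
def pvLoopB (M C : Int) (ws : List Int) : Nat → List Int → Nat → Int → Int → Int
  | 0, _bins, _e, _run, best => best
  | s + 1, bins, e, run, best =>
    let w := ws.getD s 0
    if w > C then best
    else
      let p := pvShrink C ws e (run + w)
      let b := bins.getD p.1 0 + 1
      let bins' := bins.set s b
      if b > M then best
      else pvLoopB M C ws s bins' p.1 p.2 (s : Int)

def max_sculptures_alt (N : Int) (M : Int) (C : Int) (weights : List Int) : Int :=
  max (N - pvLoopB M C weights weights.length
        (List.replicate (weights.length + 1) 0) weights.length 0 (weights.length : Int)) 0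

-- ===== PRECONDITION & SPEC =====
-- Pre_ admits N ≤ 0 (nothing to pack), the task's natural domain (nonnegative
-- weights), and lists whose last weight exceeds C (no nonempty suffix packs, whatever
-- the other weights), in each case with M ≥ 1 or N ≤ len(weights). Excluded are
-- inputs A still returns on where its value is an accident of its code: with a
-- negative weight and N > 0 A's greedy probe is not monotone, so its binary search
-- stops at an arbitrary point; and with M < 1 and N > len(weights) A charges even the
-- empty suffix one bin (cnt starts at 1), so it answers 0 where B counts the
-- sculptures beyond the list.
def Pre_max_sculptures (N : Int) (M : Int) (C : Int) (weights : List Int) : Prop :=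
  N ≤ 0 ∨ (((∀ w ∈ weights, 0 ≤ w) ∨ (weights ≠ [] ∧ C < weights.getD (weights.length - 1) 0)) ∧ (1 ≤ M ∨ N ≤ (weights.length : Int)))
instance (N : Int) (M : Int) (C : Int) (weights : List Int) : Decidable (Pre_max_sculptures N M C weights) := by unfold Pre_max_sculptures; infer_instance

def pvWitness_max_sculptures : Int × Int × Int × List Int := (5, 2, 10, [4, 7, 3, 6, 2])

def Spec_max_sculptures (N : Int) (M : Int) (C : Int) (weights : List Int) (out : Int) : Prop := out = max_sculptures_alt N M C weights
instance (N : Int) (M : Int) (C : Int) (weights : List Int) (out : Int) : Decidable (Spec_max_sculptures N M C weights out) := by unfold Spec_max_sculptures; infer_instance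

-- ===== CLAIM (what is proved, stated in full; the proofs are below) =====
def Claim_equal_max_sculptures : Prop := ∀ (N : Int) (M : Int) (C : Int) (weights : List Int), Dom_max_sculptures N M C weights → Pre_max_sculptures N M C weights → Spec_max_sculptures N M C weights (max_sculptures N M C weights)

-- ===== LEMMAS AND PROOFS =====

-- total greedy next-fit (the canPack loop without the w > C early exit)
def pvNf (C : Int) : List Int → Int → Int → Int × Int
  | [], cnt, curr => (cnt, curr)
  | w :: ws, cnt, curr =>
    if curr + w > C then pvNf C ws (cnt + 1) (0 + w)
    else pvNf C ws cnt (curr + w)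

theorem pvCanPackGo_of_big (C M : Int) (l : List Int) (cnt curr : Int)
    (h : ∃ w ∈ l, C < w) : pvCanPackGo C M l cnt curr = false := by
  induction l generalizing cnt curr with
  | nil => simp at h
  | cons w l ih =>
    simp only [pvCanPackGo]
    by_cases hw : w > C
    · simp [hw]
    · rcases h with ⟨v, hv, hvC⟩
      have hvl : v ∈ l := by
        rcases List.mem_cons.mp hv with h | h
        · exact absurd (h ▸ hvC) (by omega)
        · exact h
      simp only [if_neg hw]
      split <;> exact ih _ _ ⟨v, hvl, hvC⟩

theorem pvCanPackGo_of_small (C M : Int) (l : List Int) (cnt curr : Int)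
    (h : ∀ w ∈ l, w ≤ C) :
    pvCanPackGo C M l cnt curr = decide ((pvNf C l cnt curr).1 ≤ M) := by
  induction l generalizing cnt curr with
  | nil => simp [pvCanPackGo, pvNf]
  | cons w l ih =>
    have hwC : ¬ w > C := by have := h w (by simp); omega
    simp only [pvCanPackGo, pvNf, if_neg hwC]
    have h' : ∀ v ∈ l, v ≤ C := fun v hv => h v (by simp [hv])
    split <;> exact ih _ _ h'

theorem pvNf_shift (C : Int) (l : List Int) (cnt j curr : Int) :
    (pvNf C l (cnt + j) curr).1 = (pvNf C l cnt curr).1 + j := by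
  induction l generalizing cnt curr with
  | nil => simp [pvNf]
  | cons w l ih =>
    simp only [pvNf]
    split
    · rw [show cnt + j + 1 = (cnt + 1) + j by ring, ih]
    · exact ih _ _

theorem pvNf_mono (C : Int) (l : List Int) (cnt cnt' curr curr' : Int)
    (hw : ∀ w ∈ l, 0 ≤ w) (hc : 0 ≤ curr) (hc' : 0 ≤ curr')
    (h1 : cnt ≤ cnt') (h2 : curr ≤ curr' ∨ cnt < cnt') :
    (pvNf C l cnt curr).1 ≤ (pvNf C l cnt' curr').1 := by
  induction l generalizing cnt cnt' curr curr' with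
  | nil => simpa [pvNf] using h1
  | cons w l ih =>
    have hw0 : 0 ≤ w := hw w (by simp)
    have hw' : ∀ v ∈ l, 0 ≤ v := fun v hv => hw v (by simp [hv])
    simp only [pvNf]
    by_cases hb : curr + w > C <;> by_cases hb' : curr' + w > C
    · rw [if_pos hb, if_pos hb']
      exact ih _ _ _ _ hw' (by omega) (by omega) (by omega) (Or.inl le_rfl)
    · rw [if_pos hb, if_neg hb']
      have hcc : ¬ curr ≤ curr' := by intro hle; omega
      have hlt : cnt < cnt' := h2.resolve_left hcc
      exact ih _ _ _ _ hw' (by omega) (by omega) (by omega) (Or.inl (by omega))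
    · rw [if_neg hb, if_pos hb']
      exact ih _ _ _ _ hw' (by omega) (by omega) (by omega) (Or.inr (by omega))
    · rw [if_neg hb, if_neg hb']
      rcases h2 with h2 | h2
      · exact ih _ _ _ _ hw' (by omega) (by omega) h1 (Or.inl (by omega))
      · exact ih _ _ _ _ hw' (by omega) (by omega) h1 (Or.inr h2)

-- packability of a suffix, as a function of the start index
def pvQ (M C : Int) (ws : List Int) (s : Nat) : Bool :=
  pvCanPackGo C M (ws.drop s) 1 0

-- one step: packability of w :: l implies packability of l (nonnegative weights)
theorem pvQ_cons (M C : Int) (w : Int) (l : List Int) (hw : ∀ v ∈ w :: l, 0 ≤ v)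
    (h : pvCanPackGo C M (w :: l) 1 0 = true) : pvCanPackGo C M l 1 0 = true := by
  by_cases hbig : ∃ v ∈ w :: l, C < v
  · rw [pvCanPackGo_of_big C M _ 1 0 hbig] at h; exact absurd h (by simp)
  · push_neg at hbig
    have hsm : ∀ v ∈ w :: l, v ≤ C := hbig
    have hsml : ∀ v ∈ l, v ≤ C := fun v hv => hsm v (by simp [hv])
    rw [pvCanPackGo_of_small C M _ 1 0 hsm] at h
    rw [pvCanPackGo_of_small C M _ 1 0 hsml]
    have hwC : ¬ (0 + w > C) := by have := hsm w (by simp); omega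
    simp only [pvNf, if_neg hwC] at h
    have hmono : (pvNf C l 1 0).1 ≤ (pvNf C l 1 (0 + w)).1 :=
      pvNf_mono C l 1 1 0 (0 + w) (fun v hv => hw v (by simp [hv])) le_rfl
        (by have := hw w (by simp); omega) le_rfl (Or.inl (by have := hw w (by simp); omega))
    simp only [decide_eq_true_eq] at h ⊢
    omega

theorem pvQ_succ (M C : Int) (ws : List Int) (hw : ∀ w ∈ ws, 0 ≤ w) (s : Nat)
    (h : pvQ M C ws s = true) : pvQ M C ws (s + 1) = true := by
  unfold pvQ at h ⊢
  rcases hd : ws.drop s with _ | ⟨w, l⟩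
  · rw [show ws.drop (s + 1) = (ws.drop s).tail by rw [List.tail_drop], hd]
    rw [hd] at h; exact h
  · rw [show ws.drop (s + 1) = (ws.drop s).tail by rw [List.tail_drop], hd]
    rw [hd] at h
    exact pvQ_cons M C w l (fun v hv => hw v (by
      have : v ∈ ws.drop s := by rw [hd]; exact hv
      exact List.mem_of_mem_drop this)) h

theorem pvQ_mono (M C : Int) (ws : List Int) (hw : ∀ w ∈ ws, 0 ≤ w)
    (s s' : Nat) (hss : s ≤ s') (h : pvQ M C ws s = true) :
    pvQ M C ws s' = true := by
  obtain ⟨j, rfl⟩ : ∃ j, s' = s + j := ⟨s' - s, by omega⟩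
  induction j with
  | zero => exact h
  | succ j ih => exact pvQ_succ M C ws hw (s + j) (ih (by omega))

theorem pvCanPack_eq_Q (N M C : Int) (ws : List Int) (k : Int) (hk : 0 ≤ N - k) :
    pvCanPack N M C ws k = pvQ M C ws (N - k).toNat := by
  unfold pvCanPack pvQ
  rw [show (N - k) = (((N - k).toNat : Nat) : Int) from (Int.toNat_of_nonneg hk).symm,
    PySem.List.slice_from_natCast]
  have hmax : max (N - k) 0 = N - k := by omega
  simp [hmax]

-- the characterization both programs are proved to satisfy (N ≥ 0)
def pvChar (N M C : Int) (ws : List Int) (x : Int) : Prop :=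
  0 ≤ x ∧ x ≤ N ∧ (pvCanPack N M C ws x = true ∨ x = 0) ∧
    ∀ k, 0 ≤ k → k ≤ N → pvCanPack N M C ws k = true → k ≤ x

theorem pvChar_unique (N M C : Int) (ws : List Int) (x y : Int)
    (hx : pvChar N M C ws x) (hy : pvChar N M C ws y) : x = y := by
  obtain ⟨hx0, hxN, hx3, hx4⟩ := hx
  obtain ⟨hy0, hyN, hy3, hy4⟩ := hy
  rcases hx3 with hx3 | hx3 <;> rcases hy3 with hy3 | hy3
  · have := hy4 x hx0 hxN hx3; have := hx4 y hy0 hyN hy3; omega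
  · have := hy4 x hx0 hxN hx3; omega
  · have := hx4 y hy0 hyN hy3; omega
  · omega

theorem pvBSearch_none (N M C : Int) (ws : List Int) (fuel : Nat) (left right ans : Int)
    (h : ¬ left ≤ right) : pvBSearch N M C ws fuel left right ans = ans := by
  cases fuel with
  | zero => rfl
  | succ n => rw [pvBSearch, if_neg h]

theorem pvBSearch_char (N M C : Int) (ws : List Int)
    (hPmono : ∀ k k' : Int, 0 ≤ k → k ≤ k' → k' ≤ N →
      pvCanPack N M C ws k' = true → pvCanPack N M C ws k = true)
    (hN : 0 ≤ N) (fuel : Nat) : ∀ (left right ans : Int),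
    (right + 1 - left).toNat < fuel →
    0 ≤ left → right ≤ N → left ≤ right + 1 →
    ((ans = left - 1 ∧ 0 ≤ ans ∧ pvCanPack N M C ws ans = true) ∨ (ans = 0 ∧ left = 0)) →
    (∀ k, right < k → k ≤ N → pvCanPack N M C ws k = false) →
    pvChar N M C ws (pvBSearch N M C ws fuel left right ans) := by
  induction fuel with
  | zero =>
    intro left right ans hf _ _ _ _ _
    exact absurd hf (by omega)
  | succ n ih =>
    intro left right ans hf hl hr hlr hans hright
    rw [pvBSearch]
    by_cases hle : left ≤ right
    · rw [if_pos hle]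
      have hmid := PySem.Int.floordiv_two_mid_bounds hle
      show pvChar N M C ws (if pvCanPack N M C ws (PySem.Int.floordiv (left + right) 2) = true then
        pvBSearch N M C ws n (PySem.Int.floordiv (left + right) 2 + 1) right (PySem.Int.floordiv (left + right) 2)
        else pvBSearch N M C ws n left (PySem.Int.floordiv (left + right) 2 - 1) ans)
      set mid := PySem.Int.floordiv (left + right) 2 with hmiddef
      split
      · next hpack =>
        exact ih (mid + 1) right mid (by omega) (by omega) hr (by omega)
          (Or.inl ⟨by ring, by omega, hpack⟩) hright
      · next hpack =>
        refine ih left (mid - 1) ans (by omega) hl (by omega) (by omega) hans ?_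
        intro k hk hkN
        by_cases hkr : right < k
        · exact hright k hkr hkN
        · by_contra hne
          have hktrue : pvCanPack N M C ws k = true := by
            cases h : pvCanPack N M C ws k
            · exact absurd h hne
            · rfl
          have := hPmono mid k (by omega) (by omega) (by omega) hktrue
          rw [this] at hpack; exact hpack rfl
    · rw [if_neg hle]
      rcases hans with ⟨h1, h2, h3⟩ | ⟨h1, h2⟩
      · exact ⟨h2, by omega, Or.inl h3, fun k hk0 hkN hk => by
          by_contra hgt'
          have := hright k (by omega) hkN
          rw [this] at hk; exact absurd hk (by simp)⟩
      · subst h1 h2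
        exact ⟨le_rfl, hN, Or.inr rfl, fun k hk0 hkN hk => by
          by_contra hgt'
          have := hright k (by omega) hkN
          rw [this] at hk; exact absurd hk (by simp)⟩

-- ---- B side spec ----

def pvSum (ws : List Int) (a b : Nat) : Int := ((ws.drop a).take (b - a)).sum

def pvGood (C : Int) (ws : List Int) (s : Nat) : Bool :=
  (ws.drop s).all (fun w => decide (w ≤ C))

def pvF (C : Int) (ws : List Int) (s : Nat) : Int := (pvNf C (ws.drop s) 1 0).1

def pvCond (M C : Int) (ws : List Int) (s : Nat) : Bool :=
  pvGood C ws s && decide (pvF C ws s ≤ M)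

-- ---- arithmetic on contiguous sums ----

theorem pvSum_self (ws : List Int) (a : Nat) : pvSum ws a a = 0 := by
  simp [pvSum]

theorem pvDrop_cons (ws : List Int) (c : Nat) (hc : c < ws.length) :
    ws.drop c = ws.getD c 0 :: ws.drop (c + 1) := by
  rw [List.getD_eq_getElem ws 0 hc]
  exact List.drop_eq_getElem_cons hc

theorem pvSum_cons (ws : List Int) (a b : Nat) (hab : a < b) (ha : a < ws.length) :
    pvSum ws a b = ws.getD a 0 + pvSum ws (a + 1) b := by
  unfold pvSum
  rw [pvDrop_cons ws a ha]
  rw [show b - a = (b - (a + 1)) + 1 by omega]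
  simp [List.take_succ_cons]

theorem pvSum_succ_right (ws : List Int) (a b : Nat) (hab : a ≤ b) (hb : b < ws.length) :
    pvSum ws a (b + 1) = pvSum ws a b + ws.getD b 0 := by
  unfold pvSum
  rw [show b + 1 - a = (b - a) + 1 by omega, List.take_succ]
  have hlen : b - a < (ws.drop a).length := by simp; omega
  rw [List.getElem?_eq_getElem hlen]
  have hab2 : a + (b - a) = b := by omega
  simp [List.sum_append, List.getElem_drop, hab2, List.getElem?_eq_getElem hb]

theorem pvSum_drop (ws : List Int) (a : Nat) :
    pvSum ws a ws.length = (ws.drop a).sum := by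
  unfold pvSum
  rw [List.take_of_length_le (by simp)]

-- ---- greedy next-fit: the whole suffix fits in one bin ----
theorem pvNf_fits (C : Int) (l : List Int) (cnt curr : Int)
    (hw : ∀ w ∈ l, 0 ≤ w) (h : curr + l.sum ≤ C) :
    (pvNf C l cnt curr).1 = cnt := by
  induction l generalizing cnt curr with
  | nil => simp [pvNf]
  | cons w l ih =>
    rw [List.sum_cons] at h
    have hs : 0 ≤ l.sum := List.sum_nonneg (fun x hx => hw x (by simp [hx]))
    have hno : ¬ curr + w > C := by omega
    simp only [pvNf, if_neg hno]
    exact ih _ _ (fun v hv => hw v (by simp [hv])) (by omega)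

-- ---- greedy next-fit: split off the first (maximal) bin ----
theorem pvNf_split (C : Int) (j : Nat) (l : List Int) (cnt curr : Int)
    (hw : ∀ w ∈ l, 0 ≤ w ∧ w ≤ C) (hc : 0 ≤ curr) (hj1 : 1 ≤ j) (hjl : j < l.length)
    (hfit : curr + (l.take j).sum ≤ C) (hover : C < curr + (l.take (j + 1)).sum) :
    (pvNf C l cnt curr).1 = (pvNf C (l.drop j) (cnt + 1) 0).1 := by
  induction j generalizing l cnt curr with
  | zero => omega
  | succ j ih =>
    rcases l with _ | ⟨w, l'⟩
    · simp at hjl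
    · have hw0 := hw w (by simp)
      by_cases hj0 : j = 0
      · subst hj0
        simp only [List.take_succ_cons, List.take_zero, List.sum_cons, List.sum_nil] at hfit hover
        rcases l' with _ | ⟨w1, l''⟩
        · simp at hjl
        · have hw1 := hw w1 (by simp)
          simp only [List.take_succ_cons, List.take_zero, List.sum_cons, List.sum_nil] at hover
          have h1 : ¬ curr + w > C := by omega
          have h2 : (curr + w) + w1 > C := by omega
          have h3 : ¬ (0 + w1 > C) := by omega
          simp only [pvNf, List.drop_succ_cons, List.drop_zero, if_neg h1, if_pos h2, if_neg h3]
      · have hj1' : 1 ≤ j := by omega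
        have h1 : ¬ curr + w > C := by
          have : (l'.take j).sum ≥ 0 :=
            List.sum_nonneg (fun x hx => (hw x (by simp [List.mem_of_mem_take hx])).1)
          simp only [List.take_succ_cons, List.sum_cons] at hfit
          omega
        simp only [pvNf, List.drop_succ_cons, if_neg h1]
        refine ih l' cnt (curr + w) (fun v hv => hw v (by simp [hv])) (by omega) hj1'
          (by simp at hjl; omega) ?_ ?_
        · simp only [List.take_succ_cons, List.sum_cons] at hfit; omega
        · simp only [List.take_succ_cons, List.sum_cons] at hover; omega

-- ---- the inner while loop ----
theorem pvShrink_spec (C : Int) (ws : List Int) (hw : ∀ w ∈ ws, 0 ≤ w) (s : Nat)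
    (hsC : ws.getD s 0 ≤ C) :
    ∀ (e : Nat) (run : Int), s < e → e ≤ ws.length → run = pvSum ws s e →
    ∃ e'' : Nat, pvShrink C ws e run = (e'', pvSum ws s e'') ∧ s < e'' ∧ e'' ≤ e ∧
      pvSum ws s e'' ≤ C ∧ (e'' = e ∨ C < pvSum ws s (e'' + 1)) := by
  intro e
  induction e with
  | zero => intro run h1; omega
  | succ e' ih =>
    intro run hse hel hrun
    rw [pvShrink]
    by_cases hrc : run ≤ C
    · exact ⟨e' + 1, by rw [if_pos hrc]; rw [hrun], hse, le_rfl, by omega, Or.inl rfl⟩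
    · rw [if_neg hrc]
      have hse' : s < e' := by
        by_contra hno
        have : s = e' := by omega
        subst this
        rw [pvSum_succ_right ws s s le_rfl (by omega), pvSum_self] at hrun
        omega
      have hrun' : run - ws.getD e' 0 = pvSum ws s e' := by
        rw [hrun, pvSum_succ_right ws s e' (by omega) (by omega)]; ring
      obtain ⟨e'', h1, h2, h3, h4, h5⟩ := ih _ hse' (by omega) hrun'
      refine ⟨e'', h1, h2, by omega, h4, ?_⟩
      rcases h5 with h5 | h5
      · subst h5; right; rw [← hrun'] at *; omega
      · exact Or.inr h5

-- ---- suffix-monotonicity of pvGood, and basic evaluations ----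
theorem pvGood_cons (C : Int) (ws : List Int) (c : Nat) (hc : c < ws.length) :
    pvGood C ws c = (decide (ws.getD c 0 ≤ C) && pvGood C ws (c + 1)) := by
  unfold pvGood
  rw [pvDrop_cons ws c hc]
  simp

-- value of the DP cell: F s in terms of the first-bin end e''
theorem pvF_step (M C : Int) (ws : List Int) (hw : ∀ w ∈ ws, 0 ≤ w) (s : Nat)
    (hs : s < ws.length) (hg : pvGood C ws s = true) (e'' : Nat) (he1 : s < e'')
    (he2 : e'' ≤ ws.length) (hfit : pvSum ws s e'' ≤ C)
    (hmax : e'' = ws.length ∨ C < pvSum ws s (e'' + 1)) :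
    pvF C ws s = (if e'' = ws.length then 0 else pvF C ws e'') + 1 := by
  have hall : ∀ w ∈ ws.drop s, 0 ≤ w ∧ w ≤ C := by
    intro v hv
    refine ⟨hw v (List.mem_of_mem_drop hv), ?_⟩
    unfold pvGood at hg
    simp only [List.all_eq_true, decide_eq_true_eq] at hg
    exact hg v hv
  rcases hmax with hmax | hmax
  · subst hmax
    rw [if_pos rfl]
    unfold pvF
    rw [pvNf_fits C _ 1 0 (fun v hv => (hall v hv).1) (by rw [← pvSum_drop]; omega)]
    norm_num
  · have hne : e'' ≠ ws.length := by
      intro h; subst h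
      unfold pvSum at hmax hfit
      rw [show ws.length + 1 - s = (ws.length - s) + 1 by omega] at hmax
      rw [List.take_of_length_le (by simp only [List.length_drop]; omega)] at hmax
      rw [List.take_of_length_le (by simp only [List.length_drop]; omega)] at hfit
      omega
    rw [if_neg hne]
    unfold pvF
    have hsplit := pvNf_split C (e'' - s) (ws.drop s) 1 0 hall le_rfl (by omega)
      (by simp; omega) (by unfold pvSum at hfit; simpa using hfit)
      (by unfold pvSum at hmax; rw [show e'' + 1 - s = (e'' - s) + 1 by omega] at hmax; simpa using hmax)
    rw [hsplit, List.drop_drop, show s + (e'' - s) = e'' by omega]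
    exact pvNf_shift C _ 1 1 0

-- cond at index s is exactly packability of the suffix starting at s
theorem pvCond_eq_Q (M C : Int) (ws : List Int) (s : Nat) :
    pvQ M C ws s = pvCond M C ws s := by
  unfold pvQ pvCond
  by_cases hbig : ∃ v ∈ ws.drop s, C < v
  · rw [pvCanPackGo_of_big C M _ 1 0 hbig]
    have : pvGood C ws s = false := by
      obtain ⟨v, hv, hvC⟩ := hbig
      unfold pvGood
      simp only [List.all_eq_false]
      exact ⟨v, hv, by simp; omega⟩
    rw [this]; simp
  · push_neg at hbig
    rw [pvCanPackGo_of_small C M _ 1 0 hbig]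
    have : pvGood C ws s = true := by
      unfold pvGood
      simp only [List.all_eq_true, decide_eq_true_eq]
      exact hbig
    rw [this]
    unfold pvF
    simp

-- cond, restated as A's packability of the rightmost N - s sculptures
theorem pvCond_eq_canPack (N M C : Int) (ws : List Int) (s : Nat) (hs : (s : Int) ≤ N) :
    pvCanPack N M C ws (N - (s : Int)) = pvCond M C ws s := by
  rw [pvCanPack_eq_Q N M C ws _ (by omega), show (N - (N - (s:Int))).toNat = s by omega]
  exact pvCond_eq_Q M C ws s

theorem pvCond_mono (M C : Int) (ws : List Int) (hw : ∀ w ∈ ws, 0 ≤ w)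
    (s s' : Nat) (hss : s ≤ s') (h : pvCond M C ws s = true) :
    pvCond M C ws s' = true := by
  rw [← pvCond_eq_Q] at h ⊢
  exact pvQ_mono M C ws hw s s' hss h

-- ---- the main loop invariant ----
theorem pvLoopB_inv (M C : Int) (ws : List Int) (hw : ∀ w ∈ ws, 0 ≤ w) :
    ∀ (c : Nat) (bins : List Int) (e : Nat) (run : Int),
    c ≤ ws.length →
    pvGood C ws c = true →
    bins.length = ws.length + 1 →
    (∀ i : Nat, c ≤ i → i ≤ ws.length →
      bins.getD i 0 = if i = ws.length then 0 else pvF C ws i) →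
    c ≤ e → e ≤ ws.length → run = pvSum ws c e → (c < ws.length → run ≤ C) →
    (e = ws.length ∨ C < pvSum ws c (e + 1)) →
    ∃ b : Nat, pvLoopB M C ws c bins e run (c : Int) = (b : Int) ∧ b ≤ c ∧
      (∀ s : Nat, b ≤ s → s < c → pvCond M C ws s = true) ∧
      (b = 0 ∨ pvCond M C ws (b - 1) = false) := by
  intro c
  induction c with
  | zero =>
    intro bins e run _ _ _ _ _ _ _ _ _
    exact ⟨0, rfl, le_rfl, fun s h1 h2 => by omega, Or.inl rfl⟩
  | succ c ih =>
    intro bins e run hcl hgood hlen hbins hce hel hrun hrC hmax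
    have hcl' : c < ws.length := by omega
    rw [pvLoopB]
    simp only []
    by_cases hwC : ws.getD c 0 > C
    · rw [if_pos hwC]
      refine ⟨c + 1, rfl, le_rfl, fun s h1 h2 => by omega, Or.inr ?_⟩
      show pvCond M C ws c = false
      unfold pvCond
      rw [pvGood_cons C ws c hcl', decide_eq_false (by omega : ¬ ws.getD c 0 ≤ C)]
      simp
    · rw [if_neg hwC]
      have hwmem : 0 ≤ ws.getD c 0 := by
        rw [List.getD_eq_getElem ws 0 hcl']
        exact hw _ (List.getElem_mem _)
      have hgoodc : pvGood C ws c = true := by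
        rw [pvGood_cons C ws c hcl', hgood, decide_eq_true (by omega : ws.getD c 0 ≤ C)]
        rfl
      have hrun2 : run + ws.getD c 0 = pvSum ws c e := by
        rw [pvSum_cons ws c e (by omega) hcl', hrun]; ring
      obtain ⟨e'', hsh, hse'', hee, hfit, hdis⟩ :=
        pvShrink_spec C ws hw c (by omega) e (run + ws.getD c 0) (by omega) hel hrun2
      rw [hsh]
      have he''L : e'' ≤ ws.length := le_trans hee hel
      have hbe : bins.getD e'' 0 = if e'' = ws.length then 0 else pvF C ws e'' :=
        hbins e'' (by omega) he''L
      have hmax'' : e'' = ws.length ∨ C < pvSum ws c (e'' + 1) := by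
        rcases hdis with h | h
        · rcases hmax with h2 | h2
          · exact Or.inl (h.trans h2)
          · right
            rw [h, pvSum_cons ws c (e + 1) (by omega) hcl']
            omega
        · exact Or.inr h
      have hFc : pvF C ws c = bins.getD e'' 0 + 1 := by
        rw [hbe]
        exact pvF_step M C ws hw c hcl' hgoodc e'' hse'' he''L hfit hmax''
      by_cases hbM : bins.getD e'' 0 + 1 > M
      · rw [if_pos hbM]
        refine ⟨c + 1, rfl, le_rfl, fun s h1 h2 => by omega, Or.inr ?_⟩
        show pvCond M C ws c = false
        unfold pvCond
        rw [hgoodc, decide_eq_false (by omega : ¬ pvF C ws c ≤ M)]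
        simp
      · rw [if_neg hbM]
        obtain ⟨b, hb, hble, hfeas, hbrk⟩ :=
          ih (bins.set c (bins.getD e'' 0 + 1)) e'' (pvSum ws c e'')
            (by omega) hgoodc (by rw [List.length_set]; exact hlen)
            (by
              intro i hi1 hi2
              by_cases hic : i = c
              · have hilen : c < bins.length := by omega
                rw [hic, List.getD, List.getElem?_set, if_pos rfl, if_pos hilen]
                simp only [Option.getD_some]
                rw [if_neg (by omega : ¬ c = ws.length)]
                exact hFc.symm
              · rw [List.getD, List.getElem?_set, if_neg (by omega : ¬ c = i)]
                exact hbins i (by omega) hi2)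
            (by omega) he''L rfl (fun _ => hfit) hmax''
        refine ⟨b, hb, by omega, ?_, hbrk⟩
        intro s h1 h2
        by_cases hsc : s = c
        · rw [hsc]
          unfold pvCond
          rw [hgoodc, decide_eq_true (by omega : pvF C ws c ≤ M)]
          rfl
        · exact hfeas s h1 (by omega)

-- the loop never returns a negative best (it only stores suffix starts)
theorem pvLoopB_nonneg (M C : Int) (ws : List Int) :
    ∀ (c : Nat) (bins : List Int) (e : Nat) (run best : Int),
    0 ≤ best → 0 ≤ pvLoopB M C ws c bins e run best := by
  intro c
  induction c with
  | zero => intro bins e run best hb; exact hb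
  | succ c ih =>
    intro bins e run best hb
    rw [pvLoopB]
    simp only []
    by_cases h1 : ws.getD c 0 > C
    · rw [if_pos h1]; exact hb
    · rw [if_neg h1]
      by_cases h2 : bins.getD (pvShrink C ws e (run + ws.getD c 0)).1 0 + 1 > M
      · rw [if_pos h2]; exact hb
      · rw [if_neg h2]; exact ih _ _ _ _ (Int.natCast_nonneg c)

-- packability of the empty suffix: one (empty) bin
theorem pvQ_of_ge (M C : Int) (ws : List Int) (s : Nat) (hs : ws.length ≤ s) :
    pvQ M C ws s = decide ((1 : Int) ≤ M) := by
  unfold pvQ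
  rw [List.drop_eq_nil_of_le hs]
  simp [pvCanPackGo]

-- B's result satisfies the characterization (on the natural domain)
theorem max_sculptures_alt_char (N M C : Int) (ws : List Int)
    (hw : ∀ w ∈ ws, 0 ≤ w) (hN : 0 ≤ N) (hM : 1 ≤ M ∨ N ≤ (ws.length : Int)) :
    pvChar N M C ws (max_sculptures_alt N M C ws) := by
  obtain ⟨b, hb, hble, hfeas, hbrk⟩ :=
    pvLoopB_inv M C ws hw ws.length (List.replicate (ws.length + 1) 0) ws.length 0
      le_rfl
      (by unfold pvGood; simp [List.drop_length])
      (by simp)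
      (by
        intro i hi1 hi2
        have hiL : i = ws.length := by omega
        subst hiL
        rw [if_pos rfl]
        simp [List.getD])
      le_rfl le_rfl (pvSum_self ws ws.length).symm
      (fun h => absurd h (lt_irrefl _)) (Or.inl rfl)
  have hble' : ((b : Nat) : Int) ≤ (ws.length : Int) := by exact_mod_cast hble
  unfold max_sculptures_alt
  rw [hb]
  have hmax1 := le_max_left (N - ((b : Nat) : Int)) 0
  have hmax2 := le_max_right (N - ((b : Nat) : Int)) 0
  refine ⟨hmax2, max_le (by omega) hN, ?_, ?_⟩
  · by_cases hx0 : N - ((b : Nat) : Int) ≤ 0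
    · right; rw [max_eq_right hx0]
    · left
      rw [max_eq_left (by omega)]
      by_cases hbL : b = ws.length
      · subst hbL
        rw [pvCanPack_eq_Q N M C ws _ (by omega),
          show (N - (N - ((ws.length : Nat) : Int))).toNat = ws.length by omega]
        rw [pvQ_of_ge M C ws ws.length le_rfl]
        rcases hM with hM | hM
        · simp [hM]
        · exact absurd hM (by omega)
      · have hcond : pvCond M C ws b = true := hfeas b le_rfl (by omega)
        have h := pvCond_eq_canPack N M C ws b (by omega)
        rw [hcond] at h
        exact h
  · intro k hk0 hkN hcp
    by_cases hkL : (ws.length : Int) ≤ N - k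
    · omega
    · have hsL : (N - k).toNat < ws.length := by omega
      have hcond : pvCond M C ws (N - k).toNat = true := by
        have h := pvCond_eq_canPack N M C ws (N - k).toNat (by omega)
        rw [show N - (((N - k).toNat : Nat) : Int) = k by omega] at h
        rw [← h]
        exact hcp
      by_contra hgt
      have hsb : (N - k).toNat < b := by omega
      have hb1 : pvCond M C ws (b - 1) = true :=
        pvCond_mono M C ws hw (N - k).toNat (b - 1) (by omega) hcond
      rcases hbrk with h | h
      · omega
      · rw [h] at hb1; exact absurd hb1 (by simp)

-- when the last weight exceeds C, a suffix packs iff it is empty (and M ≥ 1)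
theorem pvCanPack_lastBig (N M C : Int) (ws : List Int) (hne : ws ≠ [])
    (hlast : C < ws.getD (ws.length - 1) 0) (k : Int) (hk : 0 ≤ N - k) :
    pvCanPack N M C ws k =
      (decide ((ws.length : Int) ≤ N - k) && decide ((1 : Int) ≤ M)) := by
  have hpos : 0 < ws.length := List.length_pos_iff.mpr hne
  rw [pvCanPack_eq_Q N M C ws k hk]
  by_cases hs : ws.length ≤ (N - k).toNat
  · rw [pvQ_of_ge M C ws _ hs,
      decide_eq_true (show (ws.length : Int) ≤ N - k by omega)]
    simp
  · unfold pvQ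
    have hmem : ws.getD (ws.length - 1) 0 ∈ ws.drop (N - k).toNat := by
      have h4 : (ws.drop (N - k).toNat)[ws.length - 1 - (N - k).toNat]? =
          some (ws.getD (ws.length - 1) 0) := by
        rw [List.getElem?_drop,
          show (N - k).toNat + (ws.length - 1 - (N - k).toNat) = ws.length - 1 by omega,
          List.getElem?_eq_getElem (by omega), List.getD_eq_getElem ws 0 (by omega)]
      exact List.mem_of_getElem? h4
    rw [pvCanPackGo_of_big C M _ 1 0 ⟨_, hmem, hlast⟩,
      decide_eq_false (show ¬ (ws.length : Int) ≤ N - k by omega)]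
    simp

-- B's one-step evaluation in that region: the scan breaks at once, best = len
theorem pvAlt_lastBig (N M C : Int) (ws : List Int) (hne : ws ≠ [])
    (hlast : C < ws.getD (ws.length - 1) 0) :
    max_sculptures_alt N M C ws = max (N - (ws.length : Int)) 0 := by
  unfold max_sculptures_alt
  have hpos : 0 < ws.length := List.length_pos_iff.mpr hne
  obtain ⟨L', hL'⟩ : ∃ L', ws.length = L' + 1 := ⟨ws.length - 1, by omega⟩
  have hlast' : ws.getD L' 0 > C := by
    rw [show L' = ws.length - 1 by omega]; exact hlast
  rw [hL', pvLoopB]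
  simp only []
  rw [if_pos hlast']

-- B's result satisfies the characterization (overweight-last region)
theorem max_sculptures_alt_char2 (N M C : Int) (ws : List Int) (hne : ws ≠ [])
    (hlast : C < ws.getD (ws.length - 1) 0) (hN : 0 ≤ N)
    (hM : 1 ≤ M ∨ N ≤ (ws.length : Int)) :
    pvChar N M C ws (max_sculptures_alt N M C ws) := by
  rw [pvAlt_lastBig N M C ws hne hlast]
  have hmax1 := le_max_left (N - (ws.length : Int)) 0
  have hmax2 := le_max_right (N - (ws.length : Int)) 0
  refine ⟨hmax2, max_le (by omega) hN, ?_, ?_⟩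
  · by_cases hx : N - (ws.length : Int) ≤ 0
    · right; rw [max_eq_right hx]
    · left
      rw [max_eq_left (by omega)]
      have hM1 : (1 : Int) ≤ M := by
        rcases hM with h | h
        · exact h
        · exact absurd h (by omega)
      rw [pvCanPack_lastBig N M C ws hne hlast _ (by omega),
        decide_eq_true (show (ws.length : Int) ≤ N - (N - (ws.length : Int)) by omega),
        decide_eq_true hM1]
      rfl
  · intro k hk0 hkN hcp
    rw [pvCanPack_lastBig N M C ws hne hlast k (by omega)] at hcp
    simp only [Bool.and_eq_true, decide_eq_true_eq] at hcp
    omega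

-- ===== VERDICT (by name: the statement is the Claim_ definition above) =====
theorem max_sculptures_spec : Claim_equal_max_sculptures := by
  intro N M C ws _hD hPre
  unfold Spec_max_sculptures
  by_cases hN0 : N ≤ 0
  · -- N ≤ 0: A's search keeps ans = 0; B's count of packed sculptures clamps to 0
    have hB : max_sculptures_alt N M C ws = 0 := by
      unfold max_sculptures_alt
      have h0 : (0 : Int) ≤ pvLoopB M C ws ws.length
          (List.replicate (ws.length + 1) 0) ws.length 0 (ws.length : Int) :=
        pvLoopB_nonneg M C ws _ _ _ _ _ (Int.natCast_nonneg _)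
      rw [max_eq_right (by omega)]
    rw [hB]
    by_cases hN : N = 0
    · subst hN
      have hPmono : ∀ k k' : Int, 0 ≤ k → k ≤ k' → k' ≤ (0 : Int) →
          pvCanPack 0 M C ws k' = true → pvCanPack 0 M C ws k = true := by
        intro k k' h0 hkk hk' h
        have : k = k' := by omega
        rw [this]; exact h
      obtain ⟨h1, h2, _, _⟩ :=
        pvBSearch_char 0 M C ws hPmono le_rfl ((0 : Int) + 2).toNat 0 0 0 (by omega)
          le_rfl le_rfl (by omega) (Or.inr ⟨rfl, rfl⟩) (by intro k hk1 hk2; omega)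
      have he : max_sculptures 0 M C ws = pvBSearch 0 M C ws ((0 : Int) + 2).toNat 0 0 0 := rfl
      omega
    · unfold max_sculptures
      rw [pvBSearch_none N M C ws _ 0 N 0 (by omega)]
  · -- N > 0: the natural domain (nonnegative weights, and M ≥ 1 or N ≤ len)
    have hPre' : ((∀ w ∈ ws, 0 ≤ w) ∨ (ws ≠ [] ∧ C < ws.getD (ws.length - 1) 0)) ∧
        (1 ≤ M ∨ N ≤ (ws.length : Int)) := by
      rcases hPre with h | h
      · exact absurd h hN0
      · exact h
    obtain ⟨hcase, hM⟩ := hPre'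
    have hN' : 0 ≤ N := by omega
    rcases hcase with hw | ⟨hne, hlast⟩
    · have hPmono : ∀ k k' : Int, 0 ≤ k → k ≤ k' → k' ≤ N →
          pvCanPack N M C ws k' = true → pvCanPack N M C ws k = true := by
        intro k k' h0 hkk hk'N h
        rw [pvCanPack_eq_Q N M C ws k' (by omega)] at h
        rw [pvCanPack_eq_Q N M C ws k (by omega)]
        exact pvQ_mono M C ws hw _ _ (by omega) h
      exact pvChar_unique N M C ws _ _
        (by
          unfold max_sculptures
          exact pvBSearch_char N M C ws hPmono hN' (N + 2).toNat 0 N 0 (by omega)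
            le_rfl le_rfl (by omega) (Or.inr ⟨rfl, rfl⟩) (by intro k h1 h2; omega))
        (max_sculptures_alt_char N M C ws hw hN' hM)
    · have hPmono : ∀ k k' : Int, 0 ≤ k → k ≤ k' → k' ≤ N →
          pvCanPack N M C ws k' = true → pvCanPack N M C ws k = true := by
        intro k k' h0 hkk hk'N h
        rw [pvCanPack_lastBig N M C ws hne hlast k' (by omega)] at h
        rw [pvCanPack_lastBig N M C ws hne hlast k (by omega)]
        simp only [Bool.and_eq_true, decide_eq_true_eq] at h ⊢
        omega
      exact pvChar_unique N M C ws _ _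
        (by
          unfold max_sculptures
          exact pvBSearch_char N M C ws hPmono hN' (N + 2).toNat 0 N 0 (by omega)
            le_rfl le_rfl (by omega) (Or.inr ⟨rfl, rfl⟩) (by intro k h1 h2; omega))
        (max_sculptures_alt_char2 N M C ws hne hlast hN' hM)
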